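-- pv_equiv track=rewrite | github.com/paulfaucheux/Scrabble | scrabble_analytics/utils.py | return_word
-- ===== SOURCE A (Python) =====
-- def return_word(scrabble,row,col,direction,word):
-- #     direction: define where we are searching
-- #     0: up
-- #     1: down
-- #     2: left
-- #     3: right
--     if (row < 0) | (col < 0):
--         return word
--     if (row > 10) | (col > 10):
--         return word
--     elif str(scrabble[row][col]).isalpha():
--         if direction == 0:
--             return return_word(scrabble,row-1,col,0,str(word) + str(scrabble[row][col]))
--         elif direction == 1:
--             return return_word(scrabble,row+1,col,1,str(word) + str(scrabble[row][col]))
--         elif direction == 2: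
--             return return_word(scrabble,row,col-1,2,str(word) + str(scrabble[row][col]))
--         elif direction == 3:
--             return return_word(scrabble,row,col+1,3,str(word) + str(scrabble[row][col]))
--         else:
--             return -1
--     else:
--         return word
-- ===== SOURCE B (Python) =====
-- def return_word(scrabble, row, col, direction, word):
--     deltas = {0: (-1, 0), 1: (1, 0), 2: (0, -1), 3: (0, 1)}
--     while 0 <= row <= 10 and 0 <= col <= 10 and str(scrabble[row][col]).isalpha():
--         if direction not in deltas:
--             return -1
--         word = str(word) + str(scrabble[row][col])
--         dr, dc = deltas[direction]
--         row += dr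
--         col += dc
--     return word
-- ===== Notes on version B (the rewrite author's own statement) =====
-- stated objective: idiomatic
-- what changed: The tail recursion with a word accumulator and four hard-coded recursive branches is replaced by a flat while-loop that walks the board with a (dr,dc) delta taken from a direction->delta dict, appending letters as it goes.
-- outside the precondition, e.g. on return_word([['a']], 0, 0, 5, ''): A returns -1, B returns -1
import Mathlib
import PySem

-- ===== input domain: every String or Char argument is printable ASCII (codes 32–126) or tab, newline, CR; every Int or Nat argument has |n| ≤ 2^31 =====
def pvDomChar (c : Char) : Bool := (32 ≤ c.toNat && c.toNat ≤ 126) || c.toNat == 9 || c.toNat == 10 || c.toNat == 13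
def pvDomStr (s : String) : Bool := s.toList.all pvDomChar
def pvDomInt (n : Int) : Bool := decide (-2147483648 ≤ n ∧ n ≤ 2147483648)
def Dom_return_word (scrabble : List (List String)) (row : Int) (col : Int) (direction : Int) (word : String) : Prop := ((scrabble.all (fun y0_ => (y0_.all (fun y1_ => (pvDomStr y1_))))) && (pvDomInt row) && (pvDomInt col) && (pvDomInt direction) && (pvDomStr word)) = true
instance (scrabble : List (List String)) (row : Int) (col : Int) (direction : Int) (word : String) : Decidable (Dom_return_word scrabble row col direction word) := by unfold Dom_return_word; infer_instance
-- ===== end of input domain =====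

-- B rewrites A's four-branch tail recursion as a flat delta-dict walk (different decomposition,
-- same cost); equivalence is about the return value only (neither version mutates its arguments).

-- shared helper: scrabble[row][col] as a total function ("" where Python raises IndexError;
-- Pre_ excludes every input on which such an access is reached out of range)
def pvCell (s : List (List String)) (r c : Int) : String :=
  (PySem.List.pyGet? ((PySem.List.pyGet? s r).getD []) c).getD ""

-- ===== PORT A =====
def return_word (scrabble : List (List String)) (row : Int) (col : Int) (direction : Int) (word : String) : String :=
  if row < 0 ∨ col < 0 then word
  else if row > 10 ∨ col > 10 then word
  else if PySem.Str.strIsalpha (pvCell scrabble row col) = true then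
    if direction = 0 then return_word scrabble (row - 1) col 0 (word ++ pvCell scrabble row col)
    else if direction = 1 then return_word scrabble (row + 1) col 1 (word ++ pvCell scrabble row col)
    else if direction = 2 then return_word scrabble row (col - 1) 2 (word ++ pvCell scrabble row col)
    else if direction = 3 then return_word scrabble row (col + 1) 3 (word ++ pvCell scrabble row col)
    else "-1"  -- Python A returns the int -1 here (not a str); Pre_ excludes this branch
  else word
termination_by (if direction = 0 then row + 1 else if direction = 1 then 11 - row
                else if direction = 2 then col + 1 else if direction = 3 then 11 - col else 0).toNat
decreasing_by all_goals (simp_all; try omega)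

-- ===== PORT B =====
def pvDeltas : PySem.Dict Int (Int × Int) :=
  PySem.Dict.ofList [(0, (-1, 0)), (1, (1, 0)), (2, (0, -1)), (3, (0, 1))]

-- the while-loop of Source B; fuel 12 exceeds the 11 cells a ray inside the 0..10 box can visit
def pvWalk (scrabble : List (List String)) : Nat → Int → Int → Int → String → String
  | 0, _, _, _, word => word
  | n + 1, row, col, direction, word =>
    if 0 ≤ row ∧ row ≤ 10 ∧ 0 ≤ col ∧ col ≤ 10 ∧ PySem.Str.strIsalpha (pvCell scrabble row col) = true then
      match PySem.Dict.get? pvDeltas direction with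
      | none => "-1"  -- Python B returns the int -1 here (not a str); Pre_ excludes this branch
      | some (dr, dc) => pvWalk scrabble n (row + dr) (col + dc) direction (word ++ pvCell scrabble row col)
    else word

def return_word_alt (scrabble : List (List String)) (row : Int) (col : Int) (direction : Int) (word : String) : String :=
  pvWalk scrabble 12 row col direction word

-- ===== PRECONDITION & SPEC =====
-- position is inside the 0..10 box the code tests
def pvInBox (r c : Int) : Bool := decide (0 ≤ r ∧ r ≤ 10 ∧ 0 ≤ c ∧ c ≤ 10)
-- scrabble[r][c] does not raise IndexError (used only at nonnegative positions)
def pvInRange (s : List (List String)) (r c : Int) : Bool :=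
  decide (r.toNat < s.length) && decide (c.toNat < (s.getD r.toNat []).length)
-- the k-th cell on the ray from (row,col) in direction d (d ∈ {0,1,2,3})
def pvPos (row col d : Int) (k : Nat) : Int × Int :=
  if d = 0 then (row - k, col) else if d = 1 then (row + k, col)
  else if d = 2 then (row, col - k) else (row, col + k)
-- the walk steps past this cell: it exists on the board and holds letters
def pvOkCell (s : List (List String)) (p : Int × Int) : Bool :=
  pvInRange s p.1 p.2 && PySem.Str.strIsalpha (pvCell s p.1 p.2)
def pvValidDir (d : Int) : Bool := decide (d = 0 ∨ d = 1 ∨ d = 2 ∨ d = 3)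
-- A raises IndexError: the walk reaches a cell inside the 0..10 box that is missing from the
-- board, every earlier cell on the ray having been present and alphabetic
def pvHitsEdge (s : List (List String)) (row col d : Int) : Bool :=
  pvInBox row col &&
  if pvValidDir d then
    (List.range 11).any fun k =>
      pvInBox (pvPos row col d k).1 (pvPos row col d k).2 &&
      !pvInRange s (pvPos row col d k).1 (pvPos row col d k).2 &&
      (List.range k).all fun j => pvOkCell s (pvPos row col d j)
  else !pvInRange s row col

-- Pre_ excludes exactly the inputs where A raises IndexError (the walk reaches an in-box cell
-- missing from the board) and those where A returns the int -1, not a string (alphabetic start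
-- cell with a direction outside 0..3).
def Pre_return_word (scrabble : List (List String)) (row : Int) (col : Int) (direction : Int) (word : String) : Prop :=
  pvHitsEdge scrabble row col direction = false ∧
  ¬ (pvInBox row col = true ∧ pvInRange scrabble row col = true ∧
     PySem.Str.strIsalpha (pvCell scrabble row col) = true ∧ pvValidDir direction = false)
instance (scrabble : List (List String)) (row : Int) (col : Int) (direction : Int) (word : String) : Decidable (Pre_return_word scrabble row col direction word) := by unfold Pre_return_word; infer_instance

def pvWitness_return_word : List (List String) × Int × Int × Int × String := ([["a", "b"]], 0, 0, 2, "")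

def Spec_return_word (scrabble : List (List String)) (row : Int) (col : Int) (direction : Int) (word : String) (out : String) : Prop := out = return_word_alt scrabble row col direction word
instance (scrabble : List (List String)) (row : Int) (col : Int) (direction : Int) (word : String) (out : String) : Decidable (Spec_return_word scrabble row col direction word out) := by unfold Spec_return_word; infer_instance

-- ===== CLAIM (what is proved, stated in full; the proofs are below) =====
def Claim_equal_return_word : Prop := ∀ (scrabble : List (List String)) (row : Int) (col : Int) (direction : Int) (word : String), Dom_return_word scrabble row col direction word → Pre_return_word scrabble row col direction word → Spec_return_word scrabble row col direction word (return_word scrabble row col direction word)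

-- ===== LEMMAS AND PROOFS =====

-- remaining steps before the walk leaves the 0..10 box in its direction
def pvMsr (row col direction : Int) : Nat :=
  (if direction = 0 then row + 1 else if direction = 1 then 11 - row
   else if direction = 2 then col + 1 else if direction = 3 then 11 - col else 1).toNat

lemma pvDeltas_none {d : Int} (h0 : d ≠ 0) (h1 : d ≠ 1) (h2 : d ≠ 2) (h3 : d ≠ 3) :
    PySem.Dict.get? pvDeltas d = none := by
  have hD : pvDeltas = PySem.Dict.mk [((0:Int), ((-1:Int), (0:Int))), (1, (1, 0)), (2, (0, -1)), (3, (0, 1))] := by decide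
  simp [hD, PySem.Dict.get?_mk_cons, Ne.symm h0, Ne.symm h1, Ne.symm h2, Ne.symm h3]
  rfl

lemma pvKey (s : List (List String)) (direction : Int) :
    ∀ (n : Nat) (row col : Int) (word : String),
      ((0 ≤ row ∧ row ≤ 10 ∧ 0 ≤ col ∧ col ≤ 10) → pvMsr row col direction ≤ n) →
      return_word s row col direction word = pvWalk s n row col direction word := by
  intro n
  induction n with
  | zero =>
    intro row col word h
    rw [return_word]
    by_cases h1 : row < 0 ∨ col < 0
    · simp [h1, pvWalk]
    · by_cases h2 : row > 10 ∨ col > 10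
      · simp [h1, h2, pvWalk]
      · exfalso
        have := h (by omega)
        unfold pvMsr at this
        split_ifs at this <;> omega
  | succ n ih =>
    intro row col word h
    rw [return_word]
    by_cases h1 : row < 0 ∨ col < 0
    · rw [if_pos h1]
      simp only [pvWalk]
      rw [if_neg (by omega)]
    · rw [if_neg h1]
      by_cases h2 : row > 10 ∨ col > 10
      · rw [if_pos h2]
        simp only [pvWalk]
        rw [if_neg (by omega)]
      · rw [if_neg h2]
        have hb : 0 ≤ row ∧ row ≤ 10 ∧ 0 ≤ col ∧ col ≤ 10 := by omega
        by_cases ha : PySem.Str.strIsalpha (pvCell s row col) = true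
        · rw [if_pos ha]
          simp only [pvWalk]
          have hcond : 0 ≤ row ∧ row ≤ 10 ∧ 0 ≤ col ∧ col ≤ 10 ∧
              PySem.Str.strIsalpha (pvCell s row col) = true :=
            ⟨hb.1, hb.2.1, hb.2.2.1, hb.2.2.2, ha⟩
          rw [if_pos hcond]
          have hm := h hb
          by_cases hd0 : direction = 0
          · rw [if_pos hd0]
            subst hd0
            have hg : PySem.Dict.get? pvDeltas (0 : Int) = some (-1, 0) := by decide
            rw [hg]
            have := ih (row - 1) col (word ++ pvCell s row col)
              (by intro _; unfold pvMsr at hm ⊢; simp at hm ⊢; omega)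
            simpa [show row + -1 = row - 1 by ring] using this
          · rw [if_neg hd0]
            by_cases hd1 : direction = 1
            · rw [if_pos hd1]
              subst hd1
              have hg : PySem.Dict.get? pvDeltas (1 : Int) = some (1, 0) := by decide
              rw [hg]
              have := ih (row + 1) col (word ++ pvCell s row col)
                (by intro _; unfold pvMsr at hm ⊢; simp at hm ⊢; omega)
              simpa using this
            · rw [if_neg hd1]
              by_cases hd2 : direction = 2
              · rw [if_pos hd2]
                subst hd2
                have hg : PySem.Dict.get? pvDeltas (2 : Int) = some (0, -1) := by decide
                rw [hg]
                have := ih row (col - 1) (word ++ pvCell s row col)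
                  (by intro _; unfold pvMsr at hm ⊢; simp at hm ⊢; omega)
                simpa [show col + -1 = col - 1 by ring] using this
              · rw [if_neg hd2]
                by_cases hd3 : direction = 3
                · rw [if_pos hd3]
                  subst hd3
                  have hg : PySem.Dict.get? pvDeltas (3 : Int) = some (0, 1) := by decide
                  rw [hg]
                  have := ih row (col + 1) (word ++ pvCell s row col)
                    (by intro _; unfold pvMsr at hm ⊢; simp at hm ⊢; omega)
                  simpa using this
                · rw [if_neg hd3]
                  rw [pvDeltas_none hd0 hd1 hd2 hd3]
        · rw [if_neg ha]
          simp only [pvWalk]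
          rw [if_neg (fun hc => ha hc.2.2.2.2)]

-- ===== VERDICT (by name: the statement is the Claim_ definition above) =====
theorem return_word_spec : Claim_equal_return_word := by
  intro s row col d w _ _
  unfold Spec_return_word return_word_alt
  exact pvKey s d 12 row col w (by intro hb; unfold pvMsr; split_ifs <;> omega)
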